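-- pv_equiv track=rewrite | github.com/radandreicristian/sa-caps | src/utils/ngram.py | ngram_to_index
-- ===== SOURCE A (Python) =====
-- def ngram_to_index(ngram: str,
--                    n_chars: int = 26):
--     """
--     Return the lexicographic index of the ngram following the pattern of index - value. Example is for an
--     1 - 'a'
--     ...
--     26 - 'z'
--     27 - 'aa'
--     52  - 'az'
--     53  - 'ba'
--     ...
--     703 - 'zz'
--     704 - 'aaa'
--     ...
--     18278 - 'zzz'
--     18279 - 'aaaa'
--     ...
--     Etc.
--     :param n_chars: The total number of characters in the language. English defaults to 26
--     :param ngram: A string, representing an arbitraty n-gram.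
--     :return: The index, accorcing to the rule described above.
--     """
--     index = 0
--     ord_a = ord('a')
--     indices = list(map(lambda x: ord(x) - ord_a + 1, ngram))
--     for i, char in enumerate(reversed(ngram)):
--         index += (indices[i]) * pow(n_chars, i)
--     # Todo - This needs some thorough testing:)
--     return index - 1
-- ===== SOURCE B (Python) =====
-- def ngram_to_index(ngram: str,
--                    n_chars: int = 26):
--     """Horner's method over the reversed ngram: one pass, no index list, no pow."""
--     index = 0
--     ord_a = ord('a')
--     for char in reversed(ngram):
--         index = index * n_chars + (ord(char) - ord_a + 1)
--     return index - 1
-- ===== Notes on version B (the rewrite author's own statement) =====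
-- stated objective: faster
-- what changed: Replaces the precomputed index list plus per-character pow(n_chars, i) accumulation with a single Horner's-method pass over the reversed string, removing the repeated large-power computations.
import Mathlib
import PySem

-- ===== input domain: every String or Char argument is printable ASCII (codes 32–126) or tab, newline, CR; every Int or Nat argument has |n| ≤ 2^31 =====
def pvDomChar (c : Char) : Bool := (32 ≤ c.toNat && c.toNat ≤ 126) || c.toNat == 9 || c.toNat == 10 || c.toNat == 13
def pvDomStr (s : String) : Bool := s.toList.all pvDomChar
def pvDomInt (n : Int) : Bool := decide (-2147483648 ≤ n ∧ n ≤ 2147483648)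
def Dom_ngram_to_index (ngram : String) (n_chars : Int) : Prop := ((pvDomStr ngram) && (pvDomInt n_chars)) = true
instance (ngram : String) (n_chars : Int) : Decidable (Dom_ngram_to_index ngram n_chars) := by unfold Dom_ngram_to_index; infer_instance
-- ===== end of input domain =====

-- B replaces A's index list + per-character pow accumulation by one Horner pass over the
-- reversed string; same return value everywhere (both are total).

-- ===== PORT A =====
-- the `for i, char in enumerate(reversed(ngram))` loop; `char` is unused by the body,
-- `indices[i]` is always in range (same length), so `getD _ 0` is exact
def ngramLoopA (indices : List Int) (n_chars : Int) : List Char → Nat → Int → Int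
  | [], _, index => index
  | _ :: rest, i, index =>
      ngramLoopA indices n_chars rest (i + 1) (index + indices.getD i 0 * n_chars ^ i)

def ngram_to_index (ngram : String) (n_chars : Int) : Int :=
  let ord_a : Int := 97
  let indices := ngram.toList.map (fun x => (x.toNat : Int) - ord_a + 1)
  ngramLoopA indices n_chars ngram.toList.reverse 0 0 - 1

-- ===== PORT B =====
def ngram_to_index_alt (ngram : String) (n_chars : Int) : Int :=
  let ord_a : Int := 97
  ngram.toList.reverse.foldl
    (fun index char => index * n_chars + ((char.toNat : Int) - ord_a + 1)) 0 - 1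

-- ===== PRECONDITION & SPEC =====
def Spec_ngram_to_index (ngram : String) (n_chars : Int) (out : Int) : Prop := out = ngram_to_index_alt ngram n_chars
instance (ngram : String) (n_chars : Int) (out : Int) : Decidable (Spec_ngram_to_index ngram n_chars out) := by unfold Spec_ngram_to_index; infer_instance

-- ===== CLAIM (what is proved, stated in full; the proofs are below) =====
def Claim_equal_ngram_to_index : Prop := ∀ (ngram : String) (n_chars : Int), Dom_ngram_to_index ngram n_chars → Spec_ngram_to_index ngram n_chars (ngram_to_index ngram n_chars)

-- ===== LEMMAS AND PROOFS =====

-- value of a character and the common polynomial both sides compute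
def pvVal (c : Char) : Int := (c.toNat : Int) - 97 + 1

def pvPoly (x : Int) : List Char → Int
  | [] => 0
  | c :: t => pvVal c + x * pvPoly x t

theorem loopA_eq (x : Int) : ∀ (m : List Char) (ind : List Int) (i : Nat) (acc : Int),
    ngramLoopA ind x m i acc
      = acc + ∑ j ∈ Finset.range m.length, ind.getD (i + j) 0 * x ^ (i + j) := by
  intro m
  induction m with
  | nil => intro ind i acc; simp [ngramLoopA]
  | cons c rest ih =>
    intro ind i acc
    simp only [ngramLoopA, ih, List.length_cons]
    rw [Finset.sum_range_succ']
    have h : ∀ j, ind.getD (i + (j + 1)) 0 * x ^ (i + (j + 1))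
        = ind.getD (i + 1 + j) 0 * x ^ (i + 1 + j) := by
      intro j
      have : i + (j + 1) = i + 1 + j := by omega
      rw [this]
    simp only [h, Nat.add_zero]
    ring

theorem sum_eq_poly (x : Int) : ∀ (l : List Char),
    (∑ j ∈ Finset.range l.length, (l.map pvVal).getD j 0 * x ^ j) = pvPoly x l := by
  intro l
  induction l with
  | nil => simp [pvPoly]
  | cons c t ih =>
    simp only [List.length_cons, List.map_cons]
    rw [Finset.sum_range_succ']
    simp only [List.getD_cons_succ, List.getD_cons_zero, pow_zero, mul_one, pow_succ]
    rw [pvPoly, ← ih, Finset.mul_sum, add_comm]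
    congr 1
    apply Finset.sum_congr rfl
    intro j _
    ring

theorem hornerB (x : Int) : ∀ (l : List Char) (acc : Int),
    l.reverse.foldl (fun index char => index * x + pvVal char) acc
      = acc * x ^ l.length + pvPoly x l := by
  intro l
  induction l with
  | nil => intro acc; simp [pvPoly]
  | cons c t ih =>
    intro acc
    simp only [List.reverse_cons, List.foldl_append, List.foldl_cons, List.foldl_nil, ih,
      List.length_cons, pvPoly]
    ring

-- ===== VERDICT (by name: the statement is the Claim_ definition above) =====
theorem ngram_to_index_spec : Claim_equal_ngram_to_index := by
  intro ngram n_chars _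
  unfold Spec_ngram_to_index ngram_to_index ngram_to_index_alt
  simp only []
  rw [loopA_eq]
  have hB := hornerB n_chars ngram.toList 0
  simp only [pvVal] at hB
  rw [hB]
  have hS := sum_eq_poly n_chars ngram.toList
  have hv : pvVal = fun c : Char => ((c.toNat : Int) - 97 + 1) := rfl
  rw [hv] at hS
  simp only [List.length_reverse, zero_add, zero_mul]
  rw [hS]
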